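-- pv_equiv track=rewrite | github.com/yadomkar/RelCheck | relcheck_v2/correction/_nli.py | classify_evidence_source
-- ===== SOURCE A (Python) =====
-- from enum import Enum
--
-- class EvidenceSource(str, Enum):
--     """Origin of the KB evidence that drove the NLI verdict."""
--
--     SPATIAL_FACT = "spatial_fact"
--     VISUAL_DESCRIPTION = "visual_description"
--     ENTITY_EXISTENCE = "entity_existence"
--     SCENE_GRAPH = "scene_graph"
--     MIXED = "mixed"
--
-- def classify_evidence_source(evidence: list[str]) -> EvidenceSource:
--     """Determine the dominant evidence source type from evidence strings.
--
--     Returns SPATIAL_FACT / VISUAL_DESCRIPTION / ENTITY_EXISTENCE if all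
--     evidence shares one tag, MIXED if multiple tag types present.
--     """
--     sources: set[EvidenceSource] = set()
--     for e in evidence:
--         if e.startswith("[spatial_fact]"):
--             sources.add(EvidenceSource.SPATIAL_FACT)
--         elif e.startswith("[entity_existence]"):
--             sources.add(EvidenceSource.ENTITY_EXISTENCE)
--         elif e.startswith("[visual_description]"):
--             sources.add(EvidenceSource.VISUAL_DESCRIPTION)
--         elif e.startswith("[scene_graph]"):
--             sources.add(EvidenceSource.SCENE_GRAPH)
--
--     if len(sources) == 0:
--         return EvidenceSource.VISUAL_DESCRIPTION  # fallback
--     if len(sources) == 1: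
--         return sources.pop()
--     return EvidenceSource.MIXED
-- ===== SOURCE B (Python) =====
-- from enum import Enum
--
-- class EvidenceSource(str, Enum):
--     """Origin of the KB evidence that drove the NLI verdict."""
--
--     SPATIAL_FACT = "spatial_fact"
--     VISUAL_DESCRIPTION = "visual_description"
--     ENTITY_EXISTENCE = "entity_existence"
--     SCENE_GRAPH = "scene_graph"
--     MIXED = "mixed"
--
-- _TAGS = ["spatial_fact", "entity_existence", "visual_description", "scene_graph"]
--
-- def classify_evidence_source(evidence: list[str]) -> EvidenceSource:
--     """Staged per-tag passes: one membership scan per tag, then size the result.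
--
--     Correct because the bracketed prefixes are pairwise non-prefixes of each
--     other, so each string matches at most one tag and independent per-tag
--     scans find exactly the tag set A accumulates.
--     """
--     present = [t for t in _TAGS if any(e.startswith("[" + t + "]") for e in evidence)]
--     if len(present) > 1:
--         return EvidenceSource.MIXED
--     if present:
--         return EvidenceSource(present[0])
--     return EvidenceSource.VISUAL_DESCRIPTION
-- ===== Notes on version B (the rewrite author's own statement) =====
-- stated objective: alternative
-- what changed: Inverts the traversal: instead of one pass over the evidence with a per-element elif chain feeding a set that is then sized, B makes one independent any()-scan per tag over the evidence (4 staged passes in a fixed tag order), building the list of present tags directly; correctness rests on the bracketed prefixes being pairwise non-prefixes.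
import Mathlib
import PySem

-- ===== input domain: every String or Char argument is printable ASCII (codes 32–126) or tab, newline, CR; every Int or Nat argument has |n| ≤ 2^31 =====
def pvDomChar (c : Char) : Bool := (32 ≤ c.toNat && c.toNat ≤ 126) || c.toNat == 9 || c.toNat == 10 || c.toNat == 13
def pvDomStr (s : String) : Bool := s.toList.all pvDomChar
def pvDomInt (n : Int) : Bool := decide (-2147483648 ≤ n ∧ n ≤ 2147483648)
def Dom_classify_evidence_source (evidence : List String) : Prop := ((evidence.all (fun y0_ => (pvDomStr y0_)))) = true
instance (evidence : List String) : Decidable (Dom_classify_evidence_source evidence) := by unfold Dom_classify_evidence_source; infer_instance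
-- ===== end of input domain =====

-- B inverts the traversal: instead of A's one pass over the evidence with a per-element
-- elif chain feeding a set that is then sized, B makes one independent any()-scan over the
-- evidence per tag (4 staged passes, fixed tag order) and sizes the resulting tag list
-- (objective: alternative decomposition, same cost).
-- The EvidenceSource str-enum values are ported as their underlying strings.

-- ===== PORT A =====
-- set.pop() is only reached when the set has exactly one element, where it returns that
-- element: ported as headD (exact there; Python's arbitrary pop order is never observed).
def classify_evidence_source (evidence : List String) : String :=
  let sources : PySem.Set String := evidence.foldl (fun sources e =>
    if PySem.Str.startswith e "[spatial_fact]" then PySem.Set.add sources "spatial_fact"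
    else if PySem.Str.startswith e "[entity_existence]" then PySem.Set.add sources "entity_existence"
    else if PySem.Str.startswith e "[visual_description]" then PySem.Set.add sources "visual_description"
    else if PySem.Str.startswith e "[scene_graph]" then PySem.Set.add sources "scene_graph"
    else sources) PySem.Set.empty
  if sources.length = 0 then "visual_description"
  else if sources.length = 1 then sources.headD ""
  else "mixed"

-- ===== PORT B =====
def pvTags : List String := ["spatial_fact", "entity_existence", "visual_description", "scene_graph"]

def classify_evidence_source_alt (evidence : List String) : String :=
  let present := pvTags.filter (fun t => evidence.any (fun e => PySem.Str.startswith e ("[" ++ t ++ "]")))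
  if 1 < present.length then "mixed"
  else if present ≠ [] then present.headD "" else "visual_description"

-- ===== PRECONDITION & SPEC =====
def Spec_classify_evidence_source (evidence : List String) (out : String) : Prop := out = classify_evidence_source_alt evidence
instance (evidence : List String) (out : String) : Decidable (Spec_classify_evidence_source evidence out) := by unfold Spec_classify_evidence_source; infer_instance

-- ===== CLAIM (what is proved, stated in full; the proofs are below) =====
def Claim_equal_classify_evidence_source : Prop := ∀ (evidence : List String), Dom_classify_evidence_source evidence → Spec_classify_evidence_source evidence (classify_evidence_source evidence)

-- ===== LEMMAS AND PROOFS =====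

-- proof-side names for A's inline pieces
def pvStepA (sources : PySem.Set String) (e : String) : PySem.Set String :=
  if PySem.Str.startswith e "[spatial_fact]" then PySem.Set.add sources "spatial_fact"
  else if PySem.Str.startswith e "[entity_existence]" then PySem.Set.add sources "entity_existence"
  else if PySem.Str.startswith e "[visual_description]" then PySem.Set.add sources "visual_description"
  else if PySem.Str.startswith e "[scene_graph]" then PySem.Set.add sources "scene_graph"
  else sources

def pvFinishA (sources : PySem.Set String) : String :=
  if sources.length = 0 then "visual_description"
  else if sources.length = 1 then sources.headD ""
  else "mixed"

theorem pvA_eq (evidence : List String) :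
    classify_evidence_source evidence = pvFinishA (evidence.foldl pvStepA PySem.Set.empty) := rfl

-- the tag A's branch chain assigns to one evidence string
def pvTagOf (e : String) : Option String :=
  if PySem.Str.startswith e "[spatial_fact]" then some "spatial_fact"
  else if PySem.Str.startswith e "[entity_existence]" then some "entity_existence"
  else if PySem.Str.startswith e "[visual_description]" then some "visual_description"
  else if PySem.Str.startswith e "[scene_graph]" then some "scene_graph"
  else none

-- two prefixes of one string: the shorter is a 'take' of the longer
theorem pv_two_prefix {l p q : List Char} (hp : p <+: l) (hq : q <+: l)
    (hlen : p.length ≤ q.length) : p = q.take p.length := by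
  calc p = l.take p.length := List.prefix_iff_eq_take.mp hp
    _ = (l.take q.length).take p.length := by rw [List.take_take, min_eq_left hlen]
    _ = q.take p.length := by rw [← List.prefix_iff_eq_take.mp hq]

-- no string starts with two distinct bracketed tags
theorem pv_not_both (e p q : String)
    (h1 : ¬ p.toList = q.toList.take p.toList.length)
    (h2 : ¬ q.toList = p.toList.take q.toList.length) :
    ¬ (PySem.Str.startswith e p = true ∧ PySem.Str.startswith e q = true) := by
  rintro ⟨hp, hq⟩
  rw [PySem.Str.startswith_eq, PySem.Chars.startswith_iff] at hp hq
  rcases le_total p.toList.length q.toList.length with hle | hle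
  · exact h1 (pv_two_prefix hp hq hle)
  · exact h2 (pv_two_prefix hq hp hle)

-- A's elif chain assigns tag t iff the bracketed-t prefix test succeeds, for each tag
theorem pvTagOf_iff (e : String) (t : String) (ht : t ∈ pvTags) :
    pvTagOf e = some t ↔ PySem.Str.startswith e ("[" ++ t ++ "]") = true := by
  have e1 := pv_not_both e "[spatial_fact]" "[entity_existence]" (by decide) (by decide)
  have e2 := pv_not_both e "[spatial_fact]" "[visual_description]" (by decide) (by decide)
  have e3 := pv_not_both e "[spatial_fact]" "[scene_graph]" (by decide) (by decide)
  have e4 := pv_not_both e "[entity_existence]" "[visual_description]" (by decide) (by decide)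
  have e5 := pv_not_both e "[entity_existence]" "[scene_graph]" (by decide) (by decide)
  have e6 := pv_not_both e "[visual_description]" "[scene_graph]" (by decide) (by decide)
  fin_cases ht
  · rw [show ("[" ++ "spatial_fact" ++ "]" : String) = "[spatial_fact]" from by decide]
    unfold pvTagOf
    constructor
    · intro h; split_ifs at h <;> simp_all
    · intro h; split_ifs with h1 h2 h3 h4 <;> simp_all
  · rw [show ("[" ++ "entity_existence" ++ "]" : String) = "[entity_existence]" from by decide]
    unfold pvTagOf
    constructor
    · intro h; split_ifs at h <;> simp_all
    · intro h; split_ifs with h1 h2 h3 h4 <;> simp_all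
  · rw [show ("[" ++ "visual_description" ++ "]" : String) = "[visual_description]" from by decide]
    unfold pvTagOf
    constructor
    · intro h; split_ifs at h <;> simp_all
    · intro h; split_ifs with h1 h2 h3 h4 <;> simp_all
  · rw [show ("[" ++ "scene_graph" ++ "]" : String) = "[scene_graph]" from by decide]
    unfold pvTagOf
    constructor
    · intro h; split_ifs at h <;> simp_all
    · intro h; split_ifs with h1 h2 h3 h4 <;> simp_all

-- membership in A's accumulated set
theorem pvStepA_eq (s : PySem.Set String) (e : String) :
    pvStepA s e = match pvTagOf e with
      | none => s
      | some t => PySem.Set.add s t := by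
  unfold pvStepA pvTagOf
  split_ifs <;> rfl

theorem pv_mem_fold (l : List String) (s : PySem.Set String) (t : String) :
    t ∈ l.foldl pvStepA s ↔ t ∈ s ∨ ∃ e ∈ l, pvTagOf e = some t := by
  induction l generalizing s with
  | nil => simp
  | cons e l ih =>
    rw [List.foldl_cons, pvStepA_eq, ih]
    cases h : pvTagOf e with
    | none => simp [h]
    | some u =>
      simp only [PySem.Set.mem_add, List.mem_cons]
      constructor
      · rintro ((hs | rfl) | he)
        · exact Or.inl hs
        · exact Or.inr ⟨e, Or.inl rfl, h⟩
        · obtain ⟨x, hx, hxt⟩ := he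
          exact Or.inr ⟨x, Or.inr hx, hxt⟩
      · rintro (hs | ⟨x, (rfl | hx), hxt⟩)
        · exact Or.inl (Or.inl hs)
        · rw [h] at hxt; exact Or.inl (Or.inr (Option.some_inj.mp hxt).symm)
        · exact Or.inr ⟨x, hx, hxt⟩

theorem pv_nodup_fold (l : List String) (s : PySem.Set String) (hs : s.Nodup) :
    (l.foldl pvStepA s).Nodup := by
  induction l generalizing s with
  | nil => exact hs
  | cons e l ih =>
    rw [List.foldl_cons, pvStepA_eq]
    cases h : pvTagOf e with
    | none => exact ih s hs
    | some t =>
      show (List.foldl pvStepA (PySem.Set.add s t) l).Nodup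
      exact ih _ (PySem.Set.nodup_add s t hs)

-- the tag chosen by A's chain is always one of the four tags
theorem pvTagOf_mem (e : String) (t : String) (h : pvTagOf e = some t) : t ∈ pvTags := by
  unfold pvTagOf at h
  split_ifs at h <;> simp_all [pvTags]

-- A's set and B's present list have the same members
theorem pv_same_members (evidence : List String) (t : String) :
    t ∈ evidence.foldl pvStepA PySem.Set.empty ↔
      t ∈ pvTags.filter (fun t => evidence.any (fun e => PySem.Str.startswith e ("[" ++ t ++ "]"))) := by
  rw [pv_mem_fold, List.mem_filter]
  simp only [PySem.Set.empty, List.not_mem_nil, false_or, List.any_eq_true]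
  constructor
  · rintro ⟨e, he, ht⟩
    have htags := pvTagOf_mem e t ht
    exact ⟨htags, e, he, (pvTagOf_iff e t htags).mp ht⟩
  · rintro ⟨htags, e, he, hst⟩
    exact ⟨e, he, (pvTagOf_iff e t htags).mpr hst⟩

-- ===== VERDICT (by name: the statement is the Claim_ definition above) =====
theorem classify_evidence_source_spec : Claim_equal_classify_evidence_source := by
  intro evidence _
  unfold Spec_classify_evidence_source classify_evidence_source_alt
  rw [pvA_eq]
  set S := evidence.foldl pvStepA PySem.Set.empty with hSdef
  set P := pvTags.filter (fun t => evidence.any (fun e => PySem.Str.startswith e ("[" ++ t ++ "]"))) with hPdef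
  have hmem : ∀ t, t ∈ S ↔ t ∈ P := fun t => pv_same_members evidence t
  have hSnd : S.Nodup := pv_nodup_fold evidence PySem.Set.empty (by simp [PySem.Set.empty])
  have hPnd : P.Nodup := List.Nodup.filter _ (by decide)
  have hperm : S.Perm P := (List.perm_ext_iff_of_nodup hSnd hPnd).mpr hmem
  have hlen : S.length = P.length := hperm.length_eq
  unfold pvFinishA
  by_cases h0 : S.length = 0
  · rw [if_pos h0]
    have : P = [] := List.length_eq_zero_iff.mp (hlen ▸ h0)
    simp [this]
  · rw [if_neg h0]
    by_cases h1 : S.length = 1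
    · rw [if_pos h1]
      obtain ⟨a, ha⟩ := List.length_eq_one_iff.mp h1
      obtain ⟨b, hb⟩ := List.length_eq_one_iff.mp (hlen ▸ h1)
      have hab : a = b := by
        have := (hmem a).mp (by simp [ha])
        rw [hb] at this; simpa using this
      rw [ha, hb, hab]
      simp
    · rw [if_neg h1]
      have : 1 < P.length := by omega
      rw [if_pos this]
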